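-- pv_equiv track=rewrite | github.com/tanmoysrt/BCSE3-Assignment | Computer Network/practice/cdma-csma/walshTable.py | generateWalshTable
-- ===== SOURCE A (Python) =====
-- def generateWalshTable(n:int):
--     prevtable = [[1]]
--     p = 1
--
--     while p < n:
--         p *= 2
--         # First create the table of PxP dimension and fill with 0
--         curtable = []
--         for i in range(p):
--             row = [ 0 for _ in range(p)]
--             curtable.append(row)
--
--         # Fill appropiate values
--         for rowI in range(0, p//2):
--             for colI in range(0, p//2):
--                 curtable[rowI][colI] = prevtable[rowI][colI]
--                 curtable[rowI + p//2][colI] = prevtable[rowI][colI]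
--                 curtable[rowI][colI + p//2] = prevtable[rowI][colI]
--                 curtable[rowI + p//2][colI + p//2] = -1 * prevtable[rowI][colI]
--
--         # Update table
--         prevtable = curtable
--     return prevtable
-- ===== SOURCE B (Python) =====
-- def generateWalshTable(n: int):
--     # closed form: a cell (i, j) of the Walsh/Hadamard matrix is plus one when
--     # popcount(i & j) is even and minus one when odd; the size p doubles until
--     # it reaches n, exactly as in the original loop; par[x] holds the parity of
--     # popcount(x), filled by one linear dynamic-programming pass
--     p = 1
--     while p < n:
--         p *= 2
--     par = [0] * p
--     for x in range(1, p):
--         par[x] = par[x >> 1] ^ (x & 1)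
--     return [[-1 if par[i & j] else 1 for j in range(p)] for i in range(p)]
-- ===== Notes on version B (the rewrite author's own statement) =====
-- stated objective: alternative
-- what changed: Replaces the iterative block-doubling construction (building and mutating a fresh doubled table at each step) with a direct closed-form fill: each cell is minus one when popcount(i & j) is odd and plus one otherwise, read from a popcount-parity table filled by one linear dynamic-programming pass.
import Mathlib
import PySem

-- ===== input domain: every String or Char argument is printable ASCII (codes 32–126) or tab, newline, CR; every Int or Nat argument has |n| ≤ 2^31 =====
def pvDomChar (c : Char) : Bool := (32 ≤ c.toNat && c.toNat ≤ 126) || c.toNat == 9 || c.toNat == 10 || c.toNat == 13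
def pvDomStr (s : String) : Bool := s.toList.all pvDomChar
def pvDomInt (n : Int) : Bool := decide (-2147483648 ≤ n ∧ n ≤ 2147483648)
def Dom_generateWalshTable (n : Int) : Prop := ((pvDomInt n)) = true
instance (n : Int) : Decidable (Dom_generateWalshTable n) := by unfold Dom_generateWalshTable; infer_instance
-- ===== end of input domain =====

-- B replaces A's iterative block-doubling construction by a closed-form per-cell fill
-- ((-1)^popcount(i & j)); a different algorithm of similar cost, not claimed faster.

-- ===== PORT A =====
-- curtable[r][c] = v  (Python list mutation; a Nat index always in range at every use site)
def pvSet2 (t : List (List Int)) (r c : Nat) (v : Int) : List (List Int) :=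
  t.set r ((t.getD r []).set c v)

-- body of A's inner `for colI` loop: the four assignments, v = prevtable[rowI][colI]
def pvFillCell (prev : List (List Int)) (half : Nat) (t : List (List Int))
    (rowI colI : Nat) : List (List Int) :=
  let v := (prev.getD rowI []).getD colI 0
  pvSet2 (pvSet2 (pvSet2 (pvSet2 t rowI colI v) (rowI + half) colI v)
    rowI (colI + half) v) (rowI + half) (colI + half) (-1 * v)

-- one iteration of A's while loop, after p *= 2 (argument p is the doubled size)
def pvStepA (prev : List (List Int)) (p : Nat) : List (List Int) :=
  let curtable := (List.range p).foldl (fun acc _ => acc ++ [List.replicate p 0]) []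
  (List.range (p / 2)).foldl (fun t rowI =>
    (List.range (p / 2)).foldl (fun t colI => pvFillCell prev (p / 2) t rowI colI) t)
    curtable

-- A's while loop; p starts at 1 and only doubles, so 1 ≤ p is carried for termination
def pvLoopA (n : Int) (p : Nat) (hp : 1 ≤ p) (prev : List (List Int)) : List (List Int) :=
  if (p : Int) < n then pvLoopA n (p * 2) (by omega) (pvStepA prev (p * 2)) else prev
termination_by (n - p).toNat
decreasing_by omega

def generateWalshTable (n : Int) : List (List Int) :=
  pvLoopA n 1 (by omega) [[1]]

-- ===== PORT B =====
-- B's `p = 1; while p < n: p *= 2`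
def pvSizeB (n : Int) (p : Nat) (hp : 1 ≤ p) : Nat :=
  if (p : Int) < n then pvSizeB n (p * 2) (by omega) else p
termination_by (n - p).toNat
decreasing_by omega

def generateWalshTable_alt (n : Int) : List (List Int) :=
  let p := pvSizeB n 1 (by omega)
  let par := (List.range' 1 (p - 1)).foldl
    (fun par x => par.set x ((par.getD (x >>> 1) 0) ^^^ (x &&& 1)))
    (List.replicate p 0)
  (List.range p).map (fun i => (List.range p).map (fun j =>
    if par.getD (i &&& j) 0 ≠ 0 then (-1 : Int) else 1))

-- ===== PRECONDITION & SPEC =====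
def Spec_generateWalshTable (n : Int) (out : List (List Int)) : Prop := out = generateWalshTable_alt n
instance (n : Int) (out : List (List Int)) : Decidable (Spec_generateWalshTable n out) := by unfold Spec_generateWalshTable; infer_instance

-- ===== CLAIM (what is proved, stated in full; the proofs are below) =====
def Claim_equal_generateWalshTable : Prop := ∀ (n : Int), Dom_generateWalshTable n → Spec_generateWalshTable n (generateWalshTable n)

-- ===== LEMMAS AND PROOFS =====

-- popcount of m, i.e. bin(m).count('1')
def pvPopcountBin (m : Nat) : Nat :=
  if h : m = 0 then 0 else m % 2 + pvPopcountBin (m / 2)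
termination_by m
decreasing_by exact Nat.div_lt_self (Nat.pos_of_ne_zero h) one_lt_two

-- closed-form cell value and matrix
def pvWalsh (i j : Nat) : Int := if pvPopcountBin (i &&& j) % 2 = 0 then 1 else -1

def pvW (p : Nat) : List (List Int) :=
  (List.range p).map (fun i => (List.range p).map (pvWalsh i))

-- 2D read with defaults (total stand-in for t[i][j])
def pvGetE (t : List (List Int)) (i j : Nat) : Int := (t.getD i []).getD j 0

-- t is an m × m table
def pvShape (t : List (List Int)) (m : Nat) : Prop :=
  t.length = m ∧ ∀ r ∈ t, r.length = m

-- the value A's fill writes at cell (i,j) of the doubled table, given the old table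
def pvF (prev : List (List Int)) (h i j : Nat) : Int :=
  (if h ≤ i ∧ h ≤ j then -1 else 1) *
    pvGetE prev (if i < h then i else i - h) (if j < h then j else j - h)

lemma pvShape_set2 {t : List (List Int)} {m : Nat} (ht : pvShape t m)
    {r c : Nat} (hr : r < m) (v : Int) : pvShape (pvSet2 t r c v) m := by
  obtain ⟨hlen, hrow⟩ := ht
  have hrt : r < t.length := by omega
  refine ⟨by simp [pvSet2, hlen], ?_⟩
  intro row hmem
  rcases List.mem_or_eq_of_mem_set hmem with h | h
  · exact hrow _ h
  · subst h
    rw [List.length_set, List.getD_eq_getElem?_getD, List.getElem?_eq_getElem hrt]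
    exact hrow _ (List.getElem_mem hrt)

lemma pvGetE_set2 {t : List (List Int)} {m : Nat} (ht : pvShape t m)
    {r c : Nat} (hr : r < m) (hc : c < m) (v : Int) (i j : Nat) :
    pvGetE (pvSet2 t r c v) i j = if i = r ∧ j = c then v else pvGetE t i j := by
  obtain ⟨hlen, hrow⟩ := ht
  have hrt : r < t.length := by omega
  have hget : t.getD r [] = t[r] := by
    simp [List.getD_eq_getElem?_getD, List.getElem?_eq_getElem hrt]
  have hrl : (t.getD r []).length = m := by
    rw [hget]; exact hrow _ (List.getElem_mem hrt)
  unfold pvGetE pvSet2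
  by_cases hi : i = r
  · subst hi
    rw [List.getD_eq_getElem?_getD (l := t.set i _), List.getElem?_set, if_pos rfl,
      if_pos hrt, Option.getD_some]
    by_cases hj : j = c
    · subst hj
      rw [List.getD_eq_getElem?_getD, List.getElem?_set, if_pos rfl,
        if_pos (by omega), Option.getD_some, if_pos ⟨rfl, rfl⟩]
    · rw [List.getD_eq_getElem?_getD, List.getElem?_set,
        if_neg (fun h => hj h.symm), if_neg (by tauto), ← List.getD_eq_getElem?_getD]
  · rw [List.getD_eq_getElem?_getD (l := t.set r _), List.getElem?_set,
      if_neg (fun h => hi h.symm), if_neg (by tauto), ← List.getD_eq_getElem?_getD]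

lemma pvInit_eq (p : Nat) :
    (List.range p).foldl (fun acc _ => acc ++ [List.replicate p (0:Int)]) [] =
      List.replicate p (List.replicate p 0) := by
  have H : ∀ (k : Nat) (acc : List (List Int)),
      (List.range k).foldl (fun acc _ => acc ++ [List.replicate p (0:Int)]) acc =
        acc ++ List.replicate k (List.replicate p 0) := by
    intro k
    induction k with
    | zero => simp
    | succ k ih =>
      intro acc
      rw [List.range_succ, List.foldl_append, ih, List.replicate_succ']
      simp
  rw [H p []]; rfl

lemma pvShape_replicate (m : Nat) :
    pvShape (List.replicate m (List.replicate m (0:Int))) m := by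
  constructor
  · simp
  · intro r hr
    simp_all [List.eq_of_mem_replicate hr]

lemma pvShape_fillCell {prev t : List (List Int)} {h : Nat} (ht : pvShape t (2*h))
    {rowI colI : Nat} (hr : rowI < h) (_hc : colI < h) :
    pvShape (pvFillCell prev h t rowI colI) (2*h) := by
  unfold pvFillCell
  exact pvShape_set2 (pvShape_set2 (pvShape_set2 (pvShape_set2 ht (by omega) _)
    (by omega) _) (by omega) _) (by omega) _

lemma pvGetE_fillCell {prev t : List (List Int)} {h : Nat} (ht : pvShape t (2*h))
    {rowI colI : Nat} (hr : rowI < h) (hc : colI < h) (i j : Nat) :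
    pvGetE (pvFillCell prev h t rowI colI) i j =
      if (i = rowI ∨ i = rowI + h) ∧ (j = colI ∨ j = colI + h) then pvF prev h i j
      else pvGetE t i j := by
  have ht1 := pvShape_set2 (v := (prev.getD rowI []).getD colI 0)
    (r := rowI) (c := colI) ht (by omega)
  have ht2 := pvShape_set2 (v := (prev.getD rowI []).getD colI 0)
    (r := rowI + h) (c := colI) ht1 (by omega)
  have ht3 := pvShape_set2 (v := (prev.getD rowI []).getD colI 0)
    (r := rowI) (c := colI + h) ht2 (by omega)
  unfold pvFillCell
  rw [pvGetE_set2 ht3 (by omega) (by omega), pvGetE_set2 ht2 (by omega) (by omega),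
    pvGetE_set2 ht1 (by omega) (by omega), pvGetE_set2 ht (by omega) (by omega)]
  by_cases hI : (i = rowI ∨ i = rowI + h) ∧ (j = colI ∨ j = colI + h)
  · rw [if_pos hI]
    obtain ⟨hi | hi, hj | hj⟩ := hI <;> subst hi <;> subst hj <;> unfold pvF pvGetE
    · rw [if_neg (by omega), if_neg (by omega), if_neg (by omega), if_pos ⟨rfl, rfl⟩,
        if_neg (by omega), if_pos (by omega), if_pos (by omega), one_mul]
    · rw [if_neg (by omega), if_pos ⟨rfl, rfl⟩,
        if_neg (by omega), if_pos (by omega), if_neg (by omega), one_mul,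
        Nat.add_sub_cancel]
    · rw [if_neg (by omega), if_neg (by omega), if_pos ⟨rfl, rfl⟩,
        if_neg (by omega), if_neg (by omega), if_pos (by omega), one_mul,
        Nat.add_sub_cancel]
    · rw [if_pos ⟨rfl, rfl⟩, if_pos (by omega), if_neg (by omega), if_neg (by omega),
        Nat.add_sub_cancel, Nat.add_sub_cancel, neg_one_mul]
  · rw [if_neg hI, if_neg (by tauto), if_neg (by tauto), if_neg (by tauto),
      if_neg (by tauto)]

lemma pvInner_fold {prev : List (List Int)} {h : Nat} {rowI : Nat} (hr : rowI < h)
    (cs : List Nat) (hcs : ∀ c ∈ cs, c < h) {t : List (List Int)} (ht : pvShape t (2*h)) :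
    pvShape (cs.foldl (fun t c => pvFillCell prev h t rowI c) t) (2*h) ∧
    ∀ i j, pvGetE (cs.foldl (fun t c => pvFillCell prev h t rowI c) t) i j =
      if (i = rowI ∨ i = rowI + h) ∧ ((j < h ∧ j ∈ cs) ∨ (h ≤ j ∧ j - h ∈ cs))
      then pvF prev h i j else pvGetE t i j := by
  revert hcs ht
  induction cs generalizing t with
  | nil =>
    intro hcs ht
    refine ⟨ht, fun i j => ?_⟩
    rw [List.foldl_nil, if_neg]
    rintro ⟨-, ⟨-, hmem⟩ | ⟨-, hmem⟩⟩ <;> simp at hmem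
  | cons c cs' ih =>
    intro hcs ht
    have hch : c < h := hcs c (by simp)
    have hcs' : ∀ x ∈ cs', x < h := fun x hx => hcs x (by simp [hx])
    have ht1 := pvShape_fillCell (prev := prev) ht hr hch
    simp only [List.foldl_cons]
    obtain ⟨ihS, ihG⟩ := ih hcs' ht1
    refine ⟨ihS, fun i j => ?_⟩
    rw [ihG i j, pvGetE_fillCell ht hr hch i j]
    by_cases hA : (i = rowI ∨ i = rowI + h)
    · by_cases h1 : (j < h ∧ j ∈ cs') ∨ (h ≤ j ∧ j - h ∈ cs')
      · have h1' : (j < h ∧ j ∈ c :: cs') ∨ (h ≤ j ∧ j - h ∈ c :: cs') := by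
          rcases h1 with ⟨a, b⟩ | ⟨a, b⟩
          · exact Or.inl ⟨a, List.mem_cons_of_mem _ b⟩
          · exact Or.inr ⟨a, List.mem_cons_of_mem _ b⟩
        rw [if_pos ⟨hA, h1⟩, if_pos ⟨hA, h1'⟩]
      · rw [if_neg (by tauto)]
        by_cases h2 : (j = c ∨ j = c + h)
        · have h2' : (j < h ∧ j ∈ c :: cs') ∨ (h ≤ j ∧ j - h ∈ c :: cs') := by
            rcases h2 with rfl | rfl
            · exact Or.inl ⟨hch, List.mem_cons_self ..⟩
            · exact Or.inr ⟨by omega, by rw [Nat.add_sub_cancel]; exact List.mem_cons_self ..⟩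
          rw [if_pos ⟨hA, h2⟩, if_pos ⟨hA, h2'⟩]
        · have h3 : ¬ ((i = rowI ∨ i = rowI + h) ∧
              ((j < h ∧ j ∈ c :: cs') ∨ (h ≤ j ∧ j - h ∈ c :: cs'))) := by
            rintro ⟨-, ⟨hjh, hj⟩ | ⟨hjh, hj⟩⟩
            · rcases List.mem_cons.mp hj with rfl | hj'
              · exact h2 (Or.inl rfl)
              · exact h1 (Or.inl ⟨hjh, hj'⟩)
            · rcases List.mem_cons.mp hj with he | hj'
              · exact h2 (Or.inr (by omega))
              · exact h1 (Or.inr ⟨hjh, hj'⟩)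
          rw [if_neg (by tauto), if_neg h3]
    · rw [if_neg (by tauto), if_neg (by tauto), if_neg (by tauto)]

lemma pvOuter_fold {prev : List (List Int)} {h : Nat}
    (rs : List Nat) (hrs : ∀ r ∈ rs, r < h) {t : List (List Int)} (ht : pvShape t (2*h)) :
    pvShape (rs.foldl (fun t rowI => (List.range h).foldl
      (fun t c => pvFillCell prev h t rowI c) t) t) (2*h) ∧
    ∀ i j, pvGetE (rs.foldl (fun t rowI => (List.range h).foldl
      (fun t c => pvFillCell prev h t rowI c) t) t) i j =
      if ((i < h ∧ i ∈ rs) ∨ (h ≤ i ∧ i - h ∈ rs)) ∧ j < 2*h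
      then pvF prev h i j else pvGetE t i j := by
  revert hrs ht
  induction rs generalizing t with
  | nil =>
    intro hrs ht
    refine ⟨ht, fun i j => ?_⟩
    rw [List.foldl_nil, if_neg]
    rintro ⟨⟨-, hmem⟩ | ⟨-, hmem⟩, -⟩ <;> simp at hmem
  | cons r rs' ih =>
    intro hrs ht
    have hrh : r < h := hrs r (by simp)
    have hrs' : ∀ x ∈ rs', x < h := fun x hx => hrs x (by simp [hx])
    obtain ⟨h1S, h1G⟩ := pvInner_fold (prev := prev) hrh (List.range h)
      (fun c hc => List.mem_range.mp hc) ht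
    simp only [List.foldl_cons]
    obtain ⟨ihS, ihG⟩ := ih hrs' h1S
    refine ⟨ihS, fun i j => ?_⟩
    rw [ihG i j, h1G i j]
    have hjr : ((j < h ∧ j ∈ List.range h) ∨ (h ≤ j ∧ j - h ∈ List.range h)) ↔ j < 2*h := by
      simp [List.mem_range]; omega
    by_cases hJ : j < 2*h
    · by_cases h1 : (i < h ∧ i ∈ rs') ∨ (h ≤ i ∧ i - h ∈ rs')
      · have h1' : (i < h ∧ i ∈ r :: rs') ∨ (h ≤ i ∧ i - h ∈ r :: rs') := by
          rcases h1 with ⟨a, b⟩ | ⟨a, b⟩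
          · exact Or.inl ⟨a, List.mem_cons_of_mem _ b⟩
          · exact Or.inr ⟨a, List.mem_cons_of_mem _ b⟩
        rw [if_pos ⟨h1, hJ⟩, if_pos ⟨h1', hJ⟩]
      · rw [if_neg (by tauto)]
        by_cases h2 : (i = r ∨ i = r + h)
        · have h2' : (i < h ∧ i ∈ r :: rs') ∨ (h ≤ i ∧ i - h ∈ r :: rs') := by
            rcases h2 with rfl | rfl
            · exact Or.inl ⟨hrh, List.mem_cons_self ..⟩
            · exact Or.inr ⟨by omega, by rw [Nat.add_sub_cancel]; exact List.mem_cons_self ..⟩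
          rw [if_pos ⟨h2, hjr.mpr hJ⟩, if_pos ⟨h2', hJ⟩]
        · have h3 : ¬ (((i < h ∧ i ∈ r :: rs') ∨ (h ≤ i ∧ i - h ∈ r :: rs')) ∧ j < 2*h) := by
            rintro ⟨⟨hih, hi⟩ | ⟨hih, hi⟩, -⟩
            · rcases List.mem_cons.mp hi with rfl | hi'
              · exact h2 (Or.inl rfl)
              · exact h1 (Or.inl ⟨hih, hi'⟩)
            · rcases List.mem_cons.mp hi with he | hi'
              · exact h2 (Or.inr (by omega))
              · exact h1 (Or.inr ⟨hih, hi'⟩)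
          rw [if_neg (by rw [hjr]; tauto), if_neg h3]
    · rw [if_neg (by tauto), if_neg (by rw [hjr]; tauto), if_neg (by tauto)]

lemma pvStepA_getE (prev : List (List Int)) (h : Nat) :
    pvShape (pvStepA prev (2*h)) (2*h) ∧
    ∀ i j, i < 2*h → j < 2*h → pvGetE (pvStepA prev (2*h)) i j = pvF prev h i j := by
  unfold pvStepA
  rw [pvInit_eq, show 2*h/2 = h by omega]
  obtain ⟨hS, hG⟩ := pvOuter_fold (prev := prev) (List.range h)
    (fun r hr => List.mem_range.mp hr) (pvShape_replicate (2*h))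
  refine ⟨hS, fun i j hi hj => ?_⟩
  have hI : (i < h ∧ i ∈ List.range h) ∨ (h ≤ i ∧ i - h ∈ List.range h) := by
    rcases Nat.lt_or_ge i h with hih | hih
    · exact Or.inl ⟨hih, List.mem_range.mpr hih⟩
    · exact Or.inr ⟨hih, List.mem_range.mpr (by omega)⟩
  rw [hG i j, if_pos ⟨hI, hj⟩]

lemma pvGetE_pvW {p i j : Nat} (hi : i < p) (hj : j < p) :
    pvGetE (pvW p) i j = pvWalsh i j := by
  unfold pvGetE pvW
  simp [List.getD_eq_getElem?_getD, hi, hj]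

lemma pvShape_pvW (p : Nat) : pvShape (pvW p) p := by
  constructor
  · simp [pvW]
  · intro r hr
    simp only [pvW, List.mem_map] at hr
    obtain ⟨i, _, rfl⟩ := hr
    simp

lemma pvPop_step (z : Nat) :
    pvPopcountBin z = z % 2 + pvPopcountBin (z / 2) := by
  rw [pvPopcountBin]
  split
  · subst ‹z = 0›
    rw [pvPopcountBin]
    simp
  · rfl

lemma pvPop_add_pow {k z : Nat} (hz : z < 2^k) :
    pvPopcountBin (z + 2^k) = pvPopcountBin z + 1 := by
  induction k generalizing z with
  | zero =>
    have hz0 : z = 0 := by simpa using hz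
    subst hz0
    rw [show (0:Nat) + 2^0 = 1 by norm_num, pvPop_step 1, pvPop_step 0]
    omega
  | succ k ih =>
    have hpow : (2:Nat)^(k+1) = 2^k * 2 := by ring
    rw [pvPop_step (z + 2^(k+1)), hpow,
      show (z + 2^k * 2) % 2 = z % 2 by omega,
      show (z + 2^k * 2) / 2 = z / 2 + 2^k by omega,
      ih (by omega), pvPop_step z]
    omega

lemma pvLand_high_low {k x y : Nat} (hx : x < 2^k) (hy : y < 2^k) :
    (x + 2^k) &&& y = x &&& y := by
  apply Nat.eq_of_testBit_eq
  intro m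
  rw [Nat.testBit_land, Nat.testBit_land]
  rcases Nat.lt_trichotomy m k with hm | heq | hm
  · rw [add_comm, Nat.testBit_two_pow_add_gt hm]
  · subst heq
    rw [Nat.testBit_eq_false_of_lt hy, Bool.and_false, Bool.and_false]
  · rw [Nat.testBit_eq_false_of_lt (lt_of_lt_of_le hy (Nat.pow_le_pow_right (by omega) (by omega))),
      Bool.and_false, Bool.and_false]

lemma pvLand_high_high {k x y : Nat} (hx : x < 2^k) (hy : y < 2^k) :
    (x + 2^k) &&& (y + 2^k) = (x &&& y) + 2^k := by
  apply Nat.eq_of_testBit_eq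
  intro m
  rcases Nat.lt_trichotomy m k with hm | heq | hm
  · rw [Nat.testBit_land, add_comm x, Nat.testBit_two_pow_add_gt hm,
      add_comm y, Nat.testBit_two_pow_add_gt hm, add_comm (x &&& y),
      Nat.testBit_two_pow_add_gt hm, Nat.testBit_land]
  · subst heq
    have hxy : x &&& y < 2^m := lt_of_le_of_lt (Nat.and_le_left) hx
    rw [Nat.testBit_land, add_comm x, Nat.testBit_two_pow_add_eq,
      add_comm y, Nat.testBit_two_pow_add_eq, add_comm (x &&& y),
      Nat.testBit_two_pow_add_eq,
      Nat.testBit_eq_false_of_lt hx, Nat.testBit_eq_false_of_lt hy,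
      Nat.testBit_eq_false_of_lt hxy]
    rfl
  · have h2 : (2:Nat)^(k+1) ≤ 2^m := Nat.pow_le_pow_right (by omega) (by omega)
    have hxy : x &&& y < 2^k := lt_of_le_of_lt (Nat.and_le_left) hx
    rw [Nat.testBit_land,
      Nat.testBit_eq_false_of_lt (show x + 2^k < 2^m by have := Nat.pow_succ 2 k; omega),
      Nat.testBit_eq_false_of_lt (show (x &&& y) + 2^k < 2^m by have := Nat.pow_succ 2 k; omega)]
    rfl

lemma pvWalsh_high_low {k x y : Nat} (hx : x < 2^k) (hy : y < 2^k) :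
    pvWalsh (x + 2^k) y = pvWalsh x y := by
  unfold pvWalsh
  rw [pvLand_high_low hx hy]

lemma pvWalsh_low_high {k x y : Nat} (hx : x < 2^k) (hy : y < 2^k) :
    pvWalsh x (y + 2^k) = pvWalsh x y := by
  unfold pvWalsh
  rw [Nat.land_comm x, pvLand_high_low hy hx, Nat.land_comm]

lemma pvWalsh_high_high {k x y : Nat} (hx : x < 2^k) (hy : y < 2^k) :
    pvWalsh (x + 2^k) (y + 2^k) = -pvWalsh x y := by
  unfold pvWalsh
  rw [pvLand_high_high hx hy, pvPop_add_pow (lt_of_le_of_lt (Nat.and_le_left) hx)]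
  by_cases hp : pvPopcountBin (x &&& y) % 2 = 0
  · rw [if_neg (by omega), if_pos hp]
  · rw [if_pos (by omega), if_neg hp]
    norm_num

lemma pvF_pvW {k i j : Nat} (hi : i < 2*2^k) (hj : j < 2*2^k) :
    pvF (pvW (2^k)) (2^k) i j = pvWalsh i j := by
  have hpos : 1 ≤ 2^k := Nat.one_le_two_pow
  unfold pvF
  rcases Nat.lt_or_ge i (2^k) with hik | hik
  · rcases Nat.lt_or_ge j (2^k) with hjk | hjk
    · rw [if_neg (by omega), if_pos hik, if_pos hjk, one_mul, pvGetE_pvW hik hjk]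
    · obtain ⟨j0, rfl⟩ : ∃ j0, j = j0 + 2^k := ⟨j - 2^k, by omega⟩
      rw [if_neg (by omega), if_pos hik, if_neg (by omega), Nat.add_sub_cancel, one_mul,
        pvGetE_pvW hik (by omega)]
      exact (pvWalsh_low_high hik (by omega)).symm
  · obtain ⟨i0, rfl⟩ : ∃ i0, i = i0 + 2^k := ⟨i - 2^k, by omega⟩
    rcases Nat.lt_or_ge j (2^k) with hjk | hjk
    · rw [if_neg (by omega), if_neg (by omega), if_pos hjk, Nat.add_sub_cancel, one_mul,
        pvGetE_pvW (by omega) hjk]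
      exact (pvWalsh_high_low (by omega) hjk).symm
    · obtain ⟨j0, rfl⟩ : ∃ j0, j = j0 + 2^k := ⟨j - 2^k, by omega⟩
      rw [if_pos (by omega), if_neg (by omega), if_neg (by omega),
        Nat.add_sub_cancel, Nat.add_sub_cancel, pvGetE_pvW (by omega) (by omega),
        neg_one_mul]
      exact (pvWalsh_high_high (by omega) (by omega)).symm

lemma pvEq_of_getE {t u : List (List Int)} {m : Nat} (htS : pvShape t m)
    (huS : pvShape u m) (h : ∀ i j, i < m → j < m → pvGetE t i j = pvGetE u i j) :
    t = u := by
  obtain ⟨hl, hr⟩ := htS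
  obtain ⟨hl', hr'⟩ := huS
  apply List.ext_getElem (by omega)
  intro i h1 h2
  have hri : t[i].length = m := hr _ (List.getElem_mem h1)
  have hri' : u[i].length = m := hr' _ (List.getElem_mem h2)
  apply List.ext_getElem (by omega)
  intro j g1 g2
  have hij := h i j (by omega) (by omega)
  unfold pvGetE at hij
  have e1 : t.getD i [] = t[i] := by
    rw [List.getD_eq_getElem?_getD, List.getElem?_eq_getElem h1, Option.getD_some]
  have e2 : u.getD i [] = u[i] := by
    rw [List.getD_eq_getElem?_getD, List.getElem?_eq_getElem h2, Option.getD_some]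
  rw [e1, e2] at hij
  rwa [List.getD_eq_getElem?_getD, List.getElem?_eq_getElem g1, Option.getD_some,
    List.getD_eq_getElem?_getD, List.getElem?_eq_getElem g2, Option.getD_some] at hij

lemma pvStepA_pvW (k : Nat) : pvStepA (pvW (2^k)) (2^k * 2) = pvW (2^k * 2) := by
  have hcomm : 2^k * 2 = 2 * 2^k := by ring
  rw [hcomm]
  obtain ⟨hS, hG⟩ := pvStepA_getE (pvW (2^k)) (2^k)
  refine pvEq_of_getE hS (pvShape_pvW (2 * 2^k)) ?_
  intro i j hi hj
  rw [hG i j hi hj, pvF_pvW hi hj, pvGetE_pvW hi hj]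

lemma pvLoopA_eq_pvW (n : Int) (m p : Nat) (hp : 1 ≤ p) (k : Nat) (hk : p = 2^k)
    (hm : (n - p).toNat ≤ m) :
    pvLoopA n p hp (pvW p) = pvW (pvSizeB n p hp) := by
  induction m generalizing p hp k hk with
  | zero =>
    rw [pvLoopA, pvSizeB, if_neg (by omega), if_neg (by omega)]
  | succ m ih =>
    rw [pvLoopA, pvSizeB]
    by_cases hc : (p : Int) < n
    · rw [if_pos hc, if_pos hc,
        show pvStepA (pvW p) (p * 2) = pvW (p * 2) from by subst hk; exact pvStepA_pvW k]
      exact ih (p * 2) (by omega) (k + 1) (by rw [hk]; ring) (by omega)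
    · rw [if_neg hc, if_neg hc]

lemma pvW_one : pvW 1 = [[1]] := by
  have : pvWalsh 0 0 = 1 := by simp [pvWalsh, pvPopcountBin]
  simp [pvW, List.range_succ, this]

lemma pvGetD_set {t : List Nat} {r : Nat} (v x : Nat) :
    (t.set r v).getD x 0 = if x = r ∧ r < t.length then v else t.getD x 0 := by
  rcases Nat.lt_or_ge r t.length with hr | hr
  · by_cases hx : x = r
    · subst hx
      rw [List.getD_eq_getElem?_getD, List.getElem?_set, if_pos rfl, if_pos hr,
        Option.getD_some, if_pos ⟨rfl, hr⟩]
    · rw [List.getD_eq_getElem?_getD, List.getElem?_set, if_neg (fun h => hx h.symm),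
        ← List.getD_eq_getElem?_getD, if_neg (by tauto)]
  · rw [List.set_eq_of_length_le (by omega), if_neg (by omega)]

lemma pvParAux (p k : Nat) (hk : k ≤ p - 1) (hp : 1 ≤ p) :
    ((List.range' 1 k).foldl
        (fun par x => par.set x ((par.getD (x >>> 1) 0) ^^^ (x &&& 1)))
        (List.replicate p 0)).length = p ∧
    ∀ x, (x ≤ k → ((List.range' 1 k).foldl
        (fun par x => par.set x ((par.getD (x >>> 1) 0) ^^^ (x &&& 1)))
        (List.replicate p 0)).getD x 0 = pvPopcountBin x % 2) ∧
      (k < x → ((List.range' 1 k).foldl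
        (fun par x => par.set x ((par.getD (x >>> 1) 0) ^^^ (x &&& 1)))
        (List.replicate p 0)).getD x 0 = 0) := by
  have hget0 : ∀ x, (List.replicate p (0:Nat)).getD x 0 = 0 := by
    intro x
    rcases Nat.lt_or_ge x p with hx | hx
    · simp [List.getD_eq_getElem?_getD, hx]
    · simp [List.getD_eq_getElem?_getD, Nat.not_lt.mpr hx]
  induction k with
  | zero =>
    refine ⟨by simp, fun x => ⟨fun hx0 => ?_, fun _ => by simp⟩⟩
    have hx0' : x = 0 := by omega
    subst hx0'
    rw [List.range'_zero, List.foldl_nil, hget0, pvPopcountBin]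
    simp
  | succ k ih =>
    obtain ⟨ihL, ihG⟩ := ih (by omega)
    rw [List.range'_concat, List.foldl_append, List.foldl_cons, List.foldl_nil]
    simp only [Nat.one_mul]
    have hlt : 1 + k < p := by omega
    have hhalf : (1 + k) >>> 1 = (1 + k) / 2 := Nat.shiftRight_one _
    have hone : (1 + k) &&& 1 = (1 + k) % 2 := Nat.and_one_is_mod _
    have hdiv := ihG ((1 + k) / 2)
    have hvd : ((List.range' 1 k).foldl
        (fun par x => par.set x ((par.getD (x >>> 1) 0) ^^^ (x &&& 1)))
        (List.replicate p 0)).getD ((1 + k) >>> 1) 0 = pvPopcountBin ((1 + k) / 2) % 2 := by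
      rw [hhalf]
      exact hdiv.1 (by omega)
    have hxor : ∀ a b : Nat, a < 2 → b < 2 → a ^^^ b = (a + b) % 2 := by
      intro a b ha hb
      interval_cases a <;> interval_cases b <;> decide
    have hv : ((List.range' 1 k).foldl
          (fun par x => par.set x ((par.getD (x >>> 1) 0) ^^^ (x &&& 1)))
          (List.replicate p 0)).getD ((1 + k) >>> 1) 0 ^^^ ((1 + k) &&& 1) =
        pvPopcountBin (1 + k) % 2 := by
      rw [hvd, hone, hxor _ _ (by omega) (by omega), pvPop_step (1 + k)]
      omega
    refine ⟨by rw [List.length_set, ihL], fun x => ⟨fun hx => ?_, fun hx => ?_⟩⟩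
    · rw [pvGetD_set]
      by_cases hx1 : x = 1 + k
      · rw [if_pos ⟨hx1, by omega⟩, hv, hx1]
      · rw [if_neg (by tauto)]
        exact (ihG x).1 (by omega)
    · rw [pvGetD_set, if_neg (by omega)]
      exact (ihG x).2 (by omega)

lemma pvSizeB_pos (n : Int) (m p : Nat) (hp : 1 ≤ p) (hm : (n - p).toNat ≤ m) :
    1 ≤ pvSizeB n p hp := by
  induction m generalizing p hp with
  | zero => rw [pvSizeB, if_neg (by omega)]; omega
  | succ m ih =>
    rw [pvSizeB]
    by_cases hc : (p : Int) < n
    · rw [if_pos hc]; exact ih (p * 2) (by omega) (by omega)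
    · rw [if_neg hc]; omega

lemma pvAlt_eq_pvW (n : Int) :
    generateWalshTable_alt n = pvW (pvSizeB n 1 (by omega)) := by
  have hpos : 1 ≤ pvSizeB n 1 (by omega) :=
    pvSizeB_pos n (n - 1).toNat 1 (by omega) (by omega)
  unfold generateWalshTable_alt pvW
  obtain ⟨hL, hG⟩ := pvParAux (pvSizeB n 1 (by omega)) (pvSizeB n 1 (by omega) - 1)
    le_rfl hpos
  apply List.map_congr_left
  intro i hi
  apply List.map_congr_left
  intro j hj
  simp only [List.mem_range] at hi hj
  have hij : i &&& j < pvSizeB n 1 (by omega) := lt_of_le_of_lt Nat.and_le_left hi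
  rw [(hG (i &&& j)).1 (by omega)]
  unfold pvWalsh
  by_cases h : pvPopcountBin (i &&& j) % 2 = 0
  · rw [if_neg (by omega), if_pos h]
  · rw [if_pos h, if_neg h]

-- ===== VERDICT (by name: the statement is the Claim_ definition above) =====
theorem generateWalshTable_spec : Claim_equal_generateWalshTable := by
  intro n _
  unfold Spec_generateWalshTable generateWalshTable
  rw [pvAlt_eq_pvW, ← pvW_one,
    pvLoopA_eq_pvW n (n - 1).toNat 1 (by omega) 0 (by norm_num) (by omega)]
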